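-- pv_equiv track=rewrite | github.com/5nail000/xauusd-ai-ea | analyze_and_exclude_features.py | group_features_by_reason
-- ===== SOURCE A (Python) =====
-- from typing import List, Tuple, Set, Dict
--
-- def group_features_by_reason(features_by_reason: Dict[str, List[str]]) -> Dict[str, List[str]]:
--     """
--     Группирует фичи по причинам исключения, убирая дубликаты
--
--     Args:
--         features_by_reason: Словарь {причина: [список фичей]}
--
--     Returns:
--         Словарь с группированными фичами (без дубликатов между группами)
--     """
--     # Собираем все фичи
--     all_excluded = set()
--     for features in features_by_reason.values():
--         all_excluded.update(features)
--
--     # Группируем по приоритету причин (data leakage - самый важный)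
--     priority_order = [
--         'data_leakage',
--         'high_correlation',
--         'all_zeros',
--         'high_missing',
--         'low_importance'
--     ]
--
--     grouped = {}
--     used_features = set()
--
--     for reason in priority_order:
--         if reason not in features_by_reason:
--             continue
--
--         # Берем только те фичи, которые еще не использованы
--         features = [f for f in features_by_reason[reason] if f not in used_features]
--         if features:
--             grouped[reason] = sorted(features)
--             used_features.update(features)
--
--     return grouped
-- ===== SOURCE B (Python) =====
-- def group_features_by_reason(features_by_reason):
--     priority_order = [
--         'data_leakage',
--         'high_correlation',
--         'all_zeros',
--         'high_missing',
--         'low_importance'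
--     ]
--     # Pass 1: assign each feature to the first (highest-priority) reason listing it.
--     winner = {}
--     for reason in priority_order:
--         if reason in features_by_reason:
--             for f in features_by_reason[reason]:
--                 if f not in winner:
--                     winner[f] = reason
--     # Pass 2: select each reason's own features straight from the table.
--     grouped = {}
--     for reason in priority_order:
--         if reason in features_by_reason:
--             sel = [f for f in features_by_reason[reason] if winner.get(f) == reason]
--             if sel:
--                 grouped[reason] = sorted(sel)
--     return grouped
-- ===== Notes on version B (the rewrite author's own statement) =====
-- stated objective: alternative
-- what changed: Replaces A's single accumulating used_features guard with two selection-shaped passes: pass 1 precomputes a winner table mapping each feature to its first (highest-priority) reason, pass 2 filters each reason's list against that table; the unused all_excluded set over all values is dropped.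
import Mathlib
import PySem

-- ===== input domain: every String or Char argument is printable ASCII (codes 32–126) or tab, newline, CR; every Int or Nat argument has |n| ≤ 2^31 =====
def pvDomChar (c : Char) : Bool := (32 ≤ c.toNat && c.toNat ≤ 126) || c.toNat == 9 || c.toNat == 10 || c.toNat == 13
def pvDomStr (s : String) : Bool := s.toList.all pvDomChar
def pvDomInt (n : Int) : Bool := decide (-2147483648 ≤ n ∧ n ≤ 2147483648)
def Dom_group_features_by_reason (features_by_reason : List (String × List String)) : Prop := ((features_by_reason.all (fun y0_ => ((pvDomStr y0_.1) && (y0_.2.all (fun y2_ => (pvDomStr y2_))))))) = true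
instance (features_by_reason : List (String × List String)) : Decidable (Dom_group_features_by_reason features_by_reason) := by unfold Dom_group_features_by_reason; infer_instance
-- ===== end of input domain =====

-- B replaces A's accumulating used_features guard with a precomputed winner table
-- (feature → first priority reason listing it) and a second selection pass; same results.

def pvPriority : List String :=
  ["data_leakage", "high_correlation", "all_zeros", "high_missing", "low_importance"]

-- ===== PORT A =====
def pvAStep (d : PySem.Dict String (List String))
    (acc : PySem.Dict String (List String) × PySem.Set String) (reason : String) :
    PySem.Dict String (List String) × PySem.Set String :=
  match d.get? reason with
  | none => acc
  | some fs =>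
    let features := fs.filter (fun f => !(PySem.Set.contains acc.2 f))
    if features.isEmpty then acc
    else (acc.1.insert reason (PySem.List.sorted features (fun f => f)),
          PySem.Set.update acc.2 features)

def group_features_by_reason (features_by_reason : List (String × List String)) :
    List (String × List String) :=
  let d : PySem.Dict String (List String) := PySem.Dict.mk features_by_reason
  let _all_excluded : PySem.Set String :=
    d.values.foldl (fun s fs => PySem.Set.update s fs) PySem.Set.empty
  (pvPriority.foldl (pvAStep d) (PySem.Dict.empty, PySem.Set.empty)).1.items

-- ===== PORT B =====
def pvWinStep (reason : String) (w : PySem.Dict String String) (f : String) :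
    PySem.Dict String String :=
  if w.contains f then w else w.insert f reason

def pvWinner (d : PySem.Dict String (List String)) : PySem.Dict String String :=
  pvPriority.foldl (fun w reason =>
    match d.get? reason with
    | none => w
    | some fs => fs.foldl (pvWinStep reason) w) PySem.Dict.empty

def pvBStep (d : PySem.Dict String (List String)) (winner : PySem.Dict String String)
    (out : List (String × List String)) (reason : String) : List (String × List String) :=
  match d.get? reason with
  | none => out
  | some fs =>
    let sel := fs.filter (fun f => winner.get? f == some reason)
    if sel.isEmpty then out else out ++ [(reason, PySem.List.sorted sel (fun f => f))]

def group_features_by_reason_alt (features_by_reason : List (String × List String)) :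
    List (String × List String) :=
  let d : PySem.Dict String (List String) := PySem.Dict.mk features_by_reason
  let winner := pvWinner d
  pvPriority.foldl (pvBStep d winner) []

-- ===== PRECONDITION & SPEC =====
def Spec_group_features_by_reason (features_by_reason : List (String × List String)) (out : List (String × List String)) : Prop := out = group_features_by_reason_alt features_by_reason
instance (features_by_reason : List (String × List String)) (out : List (String × List String)) : Decidable (Spec_group_features_by_reason features_by_reason out) := by unfold Spec_group_features_by_reason; infer_instance

-- ===== CLAIM (what is proved, stated in full; the proofs are below) =====
def Claim_equal_group_features_by_reason : Prop := ∀ (features_by_reason : List (String × List String)), Dom_group_features_by_reason features_by_reason → Spec_group_features_by_reason features_by_reason (group_features_by_reason features_by_reason)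

-- ===== LEMMAS AND PROOFS =====

-- the winner-loop over an arbitrary list of reasons (pvWinner d = pvWloop d pvPriority empty)
def pvWloop (d : PySem.Dict String (List String)) (rs : List String)
    (w : PySem.Dict String String) : PySem.Dict String String :=
  rs.foldl (fun w reason =>
    match d.get? reason with
    | none => w
    | some fs => fs.foldl (pvWinStep reason) w) w

-- B's second pass, written recursively (related to the foldl by pvBfold)
def pvBsel (d : PySem.Dict String (List String)) (winner : PySem.Dict String String) :
    List String → List (String × List String)
  | [] => []
  | r :: rs =>
    (match d.get? r with
     | none => []
     | some fs =>
       let sel := fs.filter (fun f => winner.get? f == some r)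
       if sel.isEmpty then [] else [(r, PySem.List.sorted sel (fun f => f))]) ++ pvBsel d winner rs

lemma pvBfold (d : PySem.Dict String (List String)) (winner : PySem.Dict String String)
    (rs : List String) (out : List (String × List String)) :
    rs.foldl (pvBStep d winner) out = out ++ pvBsel d winner rs := by
  induction rs generalizing out with
  | nil => simp [pvBsel]
  | cons r rs ih =>
    simp only [List.foldl, pvBsel, ih]
    cases hget : d.get? r with
    | none => simp [pvBStep, hget]
    | some fs =>
      by_cases he : (fs.filter (fun f => winner.get? f == some r)).isEmpty
      · simp [pvBStep, hget, he]
      · simp [pvBStep, hget, he]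

lemma pvWinStep_persist (r : String) (fs : List String) (w : PySem.Dict String String)
    (f : String) (h : (w.get? f).isSome) :
    (fs.foldl (pvWinStep r) w).get? f = w.get? f := by
  induction fs generalizing w with
  | nil => rfl
  | cons f' fs ih =>
    simp only [List.foldl]
    by_cases hc : w.contains f' = true
    · rw [pvWinStep, if_pos hc, ih w h]
    · rw [pvWinStep, if_neg hc]
      have hne : f ≠ f' := by
        intro he; subst he
        rw [PySem.Dict.contains_eq_isSome_get?, h] at hc; exact hc rfl
      have hg : (w.insert f' r).get? f = w.get? f := by
        rw [PySem.Dict.get?_insert, if_neg hne]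
      rw [ih (w.insert f' r) (by rw [hg]; exact h), hg]

lemma pvWloop_persist (d : PySem.Dict String (List String)) (rs : List String)
    (w : PySem.Dict String String) (f : String) (h : (w.get? f).isSome) :
    (pvWloop d rs w).get? f = w.get? f := by
  induction rs generalizing w with
  | nil => rfl
  | cons r rs ih =>
    simp only [pvWloop, List.foldl]
    cases hget : d.get? r with
    | none => exact ih w h
    | some fs =>
      have hp := pvWinStep_persist r fs w f h
      have hih := ih (fs.foldl (pvWinStep r) w) (by rw [hp]; exact h)
      simp only [pvWloop] at hih
      rw [hih, hp]

lemma pvWinFold_mem (r : String) (fs : List String) (w : PySem.Dict String String)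
    (f : String) (h : w.get? f = none) (hf : f ∈ fs) :
    (fs.foldl (pvWinStep r) w).get? f = some r := by
  induction fs generalizing w with
  | nil => cases hf
  | cons f' fs ih =>
    simp only [List.foldl]
    by_cases he : f' = f
    · subst he
      have hc : w.contains f' = false := by
        rw [PySem.Dict.contains_eq_isSome_get?, h]; rfl
      rw [pvWinStep, if_neg (by rw [hc]; exact Bool.false_ne_true)]
      have hg : (w.insert f' r).get? f' = some r := PySem.Dict.get?_insert_self w f' r
      rw [pvWinStep_persist r fs (w.insert f' r) f' (by rw [hg]; rfl), hg]
    · have hf' : f ∈ fs := by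
        cases hf with
        | head => exact absurd rfl he
        | tail _ h' => exact h'
      by_cases hc : w.contains f' = true
      · rw [pvWinStep, if_pos hc]; exact ih w h hf'
      · rw [pvWinStep, if_neg hc]
        exact ih (w.insert f' r)
          (by rw [PySem.Dict.get?_insert, if_neg (fun he2 => he he2.symm)]; exact h) hf'

lemma pvWinFold_none (r : String) (fs : List String) (w : PySem.Dict String String)
    (f : String) (h : w.get? f = none) (hf : f ∉ fs) :
    (fs.foldl (pvWinStep r) w).get? f = none := by
  induction fs generalizing w with
  | nil => exact h
  | cons f' fs ih =>
    simp only [List.foldl]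
    have hne : f ≠ f' := fun he => hf (he ▸ List.mem_cons_self)
    have hf' : f ∉ fs := fun h' => hf (List.mem_cons_of_mem _ h')
    by_cases hc : w.contains f' = true
    · rw [pvWinStep, if_pos hc]; exact ih w h hf'
    · rw [pvWinStep, if_neg hc]
      exact ih (w.insert f' r) (by rw [PySem.Dict.get?_insert, if_neg hne]; exact h) hf'

lemma pvWinFold_cases (r : String) (fs : List String) (w : PySem.Dict String String)
    (f r' : String) (h : (fs.foldl (pvWinStep r) w).get? f = some r') :
    w.get? f = some r' ∨ (w.get? f = none ∧ r' = r) := by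
  cases hw : w.get? f with
  | some r'' =>
    left
    rw [pvWinStep_persist r fs w f (by rw [hw]; rfl)] at h
    rw [← hw]; exact h
  | none =>
    right
    refine ⟨rfl, ?_⟩
    by_cases hf : f ∈ fs
    · have := pvWinFold_mem r fs w f hw hf
      rw [this] at h; exact (Option.some_inj.mp h).symm
    · rw [pvWinFold_none r fs w f hw hf] at h; cases h

-- the invariant-carrying main induction: A's loop produces g.items ++ B's selection
lemma pvMain (d : PySem.Dict String (List String)) (rs : List String)
    (g : PySem.Dict String (List String)) (u : PySem.Set String)
    (w : PySem.Dict String String)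
    (hnd : rs.Nodup)
    (hg : ∀ r ∈ rs, g.contains r = false)
    (hu : ∀ f, PySem.Set.contains u f = (w.get? f).isSome)
    (hw : ∀ f r', w.get? f = some r' → r' ∉ rs) :
    (rs.foldl (pvAStep d) (g, u)).1.items = g.items ++ pvBsel d (pvWloop d rs w) rs := by
  induction rs generalizing g u w with
  | nil => simp [pvBsel]
  | cons r rs ih =>
    have hnd' : rs.Nodup := hnd.of_cons
    have hrnot : r ∉ rs := (List.nodup_cons.mp hnd).1
    simp only [List.foldl]
    cases hget : d.get? r with
    | none =>
      have hA : pvAStep d (g, u) r = (g, u) := by simp [pvAStep, hget]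
      have hW : pvWloop d (r :: rs) w = pvWloop d rs w := by
        simp only [pvWloop, List.foldl, hget]
      rw [hA, hW, pvBsel]
      simp only [hget]
      rw [List.nil_append]
      exact ih g u w hnd' (fun r' h' => hg r' (List.mem_cons_of_mem _ h'))
        hu (fun f r' h' => fun hm => hw f r' h' (List.mem_cons_of_mem _ hm))
    | some fs =>
      set w1 := fs.foldl (pvWinStep r) w with hw1
      have hWun : pvWloop d (r :: rs) w = pvWloop d rs w1 := by
        simp only [pvWloop, List.foldl, hget, hw1]
      set wfin := pvWloop d rs w1 with hwfin
      -- pointwise equality of the two filter predicates on members of fs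
      have hpt : ∀ f ∈ fs, (wfin.get? f == some r) = !(PySem.Set.contains u f) := by
        intro f _hf
        cases hwf : w.get? f with
        | some r'' =>
          have hufc : PySem.Set.contains u f = true := by rw [hu f, hwf]; rfl
          have h1 : w1.get? f = some r'' := by
            rw [hw1, pvWinStep_persist r fs w f (by rw [hwf]; rfl), hwf]
          have h2 : wfin.get? f = some r'' := by
            rw [hwfin, pvWloop_persist d rs w1 f (by rw [h1]; rfl), h1]
          have hne : r'' ≠ r := fun he => hw f r'' hwf (he ▸ List.mem_cons_self)
          rw [h2, hufc]
          simp [hne]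
        | none =>
          have hufc : PySem.Set.contains u f = false := by rw [hu f, hwf]; rfl
          have h1 : w1.get? f = some r := pvWinFold_mem r fs w f hwf _hf
          have h2 : wfin.get? f = some r := by
            rw [hwfin, pvWloop_persist d rs w1 f (by rw [h1]; rfl), h1]
          rw [h2, hufc]
          simp
      have hfilter : fs.filter (fun f => wfin.get? f == some r)
          = fs.filter (fun f => !(PySem.Set.contains u f)) :=
        List.filter_congr hpt
      set kept := fs.filter (fun f => !(PySem.Set.contains u f)) with hkept
      -- invariants for the recursive call
      have hu' : ∀ f, PySem.Set.contains (PySem.Set.update u kept) f = (w1.get? f).isSome := by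
        intro f
        rw [Bool.eq_iff_iff, PySem.Set.contains_iff, PySem.Set.mem_update, Option.isSome_iff_exists]
        constructor
        · rintro (hfu | hfk)
          · have hct : PySem.Set.contains u f = true := (PySem.Set.contains_iff u f).mpr hfu
            have hs : (w.get? f).isSome := by rw [← hu f]; exact hct
            obtain ⟨v, hv⟩ := Option.isSome_iff_exists.mp hs
            exact ⟨v, by rw [hw1, pvWinStep_persist r fs w f (by rw [hv]; rfl), hv]⟩
          · have hfs : f ∈ fs := List.mem_of_mem_filter hfk
            have hnu : ¬ (PySem.Set.contains u f = true) := by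
              have := List.of_mem_filter hfk
              simpa using this
            have hwn : w.get? f = none := by
              cases hwf : w.get? f with
              | none => rfl
              | some v => exact absurd (by rw [hu f, hwf]; rfl) hnu
            exact ⟨r, pvWinFold_mem r fs w f hwn hfs⟩
        · rintro ⟨v, hv⟩
          rcases pvWinFold_cases r fs w f v hv with hws | ⟨hwn, _⟩
          · left
            have hct : PySem.Set.contains u f = true := by rw [hu f, hws]; rfl
            exact (PySem.Set.contains_iff u f).mp hct
          · by_cases hfs : f ∈ fs
            · right; rw [hkept, List.mem_filter]
              refine ⟨hfs, ?_⟩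
              simp only [Bool.not_eq_eq_eq_not, Bool.not_true]
              rw [hu f, hwn]
              rfl
            · exfalso; rw [pvWinFold_none r fs w f hwn hfs] at hv; cases hv
      have hw' : ∀ f r', w1.get? f = some r' → r' ∉ rs := by
        intro f r' h'
        rcases pvWinFold_cases r fs w f r' h' with hws | ⟨_, he⟩
        · exact fun hm => hw f r' hws (List.mem_cons_of_mem _ hm)
        · exact he ▸ hrnot
      -- unfold one step of pvBsel with the filter rewritten
      have hB : pvBsel d wfin (r :: rs)
          = (if kept.isEmpty then [] else [(r, PySem.List.sorted kept (fun f => f))])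
            ++ pvBsel d wfin rs := by
        simp only [pvBsel, hget, hfilter]
      by_cases hke : kept.isEmpty
      · have hA : pvAStep d (g, u) r = (g, u) := by
          simp only [pvAStep, hget]
          rw [← hkept, if_pos hke]
        have hkeq : kept = [] := List.isEmpty_iff.mp hke
        have hueq : PySem.Set.update u kept = u := by rw [hkeq]; rfl
        rw [hA, hWun, hB, if_pos hke, List.nil_append]
        exact ih g u w1 hnd' (fun r' h' => hg r' (List.mem_cons_of_mem _ h'))
          (fun f => (hueq ▸ hu' f)) hw'
      · have hA : pvAStep d (g, u) r
            = (g.insert r (PySem.List.sorted kept (fun f => f)), PySem.Set.update u kept) := by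
          simp only [pvAStep, hget]
          rw [← hkept, if_neg hke]
        have hgr : g.contains r = false := hg r List.mem_cons_self
        have hg' : ∀ r' ∈ rs, (g.insert r (PySem.List.sorted kept (fun f => f))).contains r' = false := by
          intro r' h'
          rw [PySem.Dict.contains_insert]
          have hne : r' ≠ r := fun he => hrnot (he ▸ h')
          simp [hne, hg r' (List.mem_cons_of_mem _ h')]
        rw [hA, hWun, hB, if_neg hke]
        rw [ih _ _ w1 hnd' hg' hu' hw']
        rw [PySem.Dict.items_insert_of_not_contains g _ hgr]
        simp only [List.append_assoc, List.singleton_append]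
        rw [hwfin]
-- ===== VERDICT (by name: the statement is the Claim_ definition above) =====
theorem group_features_by_reason_spec : Claim_equal_group_features_by_reason := by
  intro fbr _hdom
  unfold Spec_group_features_by_reason group_features_by_reason group_features_by_reason_alt
  rw [pvBfold, List.nil_append]
  have hwin : pvWinner (PySem.Dict.mk fbr) = pvWloop (PySem.Dict.mk fbr) pvPriority PySem.Dict.empty := rfl
  rw [hwin]
  have := pvMain (PySem.Dict.mk fbr) pvPriority PySem.Dict.empty PySem.Set.empty PySem.Dict.empty
    (by decide)
    (fun r _ => PySem.Dict.contains_empty r)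
    (fun f => rfl)
    (fun f r' h => by rw [PySem.Dict.get?_empty] at h; cases h)
  rw [this]
  rfl
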